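-- pv_equiv track=rewrite | github.com/gerzytet/FlappySNES | create graphic.py | encode_char4
-- ===== SOURCE A (Python) =====
-- def encode_char4(s):
--     bpp = 4
--     rows = s.split('\n')
--     nums = [[int(c) for c in row] for row in rows]
--     result = []
--     for plane_offset in [0, 2]:
--         for row in nums:
--             for plane in range(plane_offset, plane_offset+2):
--                 byte = 0
--                 #index = bpp - plane - 1
--                 index = plane
--                 for i, c in enumerate(row):
--                     byte <<= 1
--                     byte |= (c & (1 << index)) >> index
--                 result.append(byte)
--     return result
-- ===== SOURCE B (Python) =====
-- def encode_char4(s):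
--     # One pass per pixel row, keeping the four bit-plane byte accumulators together.
--     accs = []
--     for row in s.split('\n'):
--         a0 = a1 = a2 = a3 = 0
--         for ch in row:
--             c = int(ch)
--             a0 = (a0 << 1) | (c & 1)
--             a1 = (a1 << 1) | ((c & 2) >> 1)
--             a2 = (a2 << 1) | ((c & 4) >> 2)
--             a3 = (a3 << 1) | ((c & 8) >> 3)
--         accs.append((a0, a1, a2, a3))
--     result = []
--     for a0, a1, _, _ in accs:
--         result.append(a0)
--         result.append(a1)
--     for _, _, a2, a3 in accs:
--         result.append(a2)
--         result.append(a3)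
--     return result
-- ===== Notes on version B (the rewrite author's own statement) =====
-- stated objective: alternative
-- what changed: B scans each row's pixels exactly once, maintaining all four bit-plane byte accumulators together, then emits (plane0,plane1) per row followed by (plane2,plane3) per row, instead of A's nested loops that rescan every row once per plane.
import Mathlib
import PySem

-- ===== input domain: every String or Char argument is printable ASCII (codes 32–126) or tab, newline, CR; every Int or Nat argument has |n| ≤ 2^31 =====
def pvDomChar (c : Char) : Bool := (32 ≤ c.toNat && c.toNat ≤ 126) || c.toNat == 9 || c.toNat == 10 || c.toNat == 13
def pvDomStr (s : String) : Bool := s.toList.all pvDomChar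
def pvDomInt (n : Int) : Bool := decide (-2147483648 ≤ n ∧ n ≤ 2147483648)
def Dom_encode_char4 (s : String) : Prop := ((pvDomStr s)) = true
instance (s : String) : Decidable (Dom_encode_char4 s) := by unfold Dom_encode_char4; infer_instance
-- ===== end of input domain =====

-- B packs the pixel grid in ONE pass per row (four maintained plane accumulators) instead of A's per-plane rescans; same cost class, different structure.

-- int(c) for a single character c; Pre_ guarantees c is an ASCII digit, where this is exact
def pyIntChar (c : Char) : Int := (PySem.Int.ofChars? [c]).getD 0

-- s.split('\\n'), at the List Char level (PySem.Chars.splitOn is exact for a nonempty separator)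
def pySplitNL (s : String) : List (List Char) := PySem.Chars.splitOn s.toList ['\n']

-- ===== PORT A =====
def encode_char4 (s : String) : List Int :=
  let rows := pySplitNL s
  let nums := rows.map (fun row => row.map pyIntChar)
  ([0, 2] : List Int).foldl (fun result plane_offset =>
    nums.foldl (fun result row =>
      (PySem.List.pyRange plane_offset (plane_offset + 2) 1).foldl (fun result plane =>
        -- plane ∈ {0,1,2,3} is nonnegative, so '.toNat' as shift amount is exact
        let byte := row.foldl (fun byte c =>
          PySem.Int.bor (byte <<< 1) (PySem.Int.band c (1 <<< plane.toNat) >>> plane.toNat)) 0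
        result ++ [byte]) result) result) []

-- ===== PORT B =====
def rowAccs (row : List Char) : Int × Int × Int × Int :=
  row.foldl (fun a ch =>
    let c := pyIntChar ch
    (PySem.Int.bor (a.1 <<< 1) (PySem.Int.band c 1),
     PySem.Int.bor (a.2.1 <<< 1) (PySem.Int.band c 2 >>> (1 : Nat)),
     PySem.Int.bor (a.2.2.1 <<< 1) (PySem.Int.band c 4 >>> (2 : Nat)),
     PySem.Int.bor (a.2.2.2 <<< 1) (PySem.Int.band c 8 >>> (3 : Nat)))) (0, 0, 0, 0)

def encode_char4_alt (s : String) : List Int :=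
  let accs := (pySplitNL s).map rowAccs
  let result := accs.foldl (fun r a => r ++ [a.1, a.2.1]) []
  accs.foldl (fun r a => r ++ [a.2.2.1, a.2.2.2]) result

-- ===== PRECONDITION & SPEC =====
-- Pre_ excludes exactly the inputs where Python A raises ValueError: int(c) on a character that is not an ASCII digit.
def Pre_encode_char4 (s : String) : Prop :=
  s.toList.all (fun c => c == '\n' || (decide ('0' ≤ c) && decide (c ≤ '9'))) = true
instance (s : String) : Decidable (Pre_encode_char4 s) := by unfold Pre_encode_char4; infer_instance
def pvWitness_encode_char4 : String := "30\n12"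

def Spec_encode_char4 (s : String) (out : List Int) : Prop := out = encode_char4_alt s
instance (s : String) (out : List Int) : Decidable (Spec_encode_char4 s out) := by unfold Spec_encode_char4; infer_instance

-- ===== CLAIM (what is proved, stated in full; the proofs are below) =====
def Claim_equal_encode_char4 : Prop := ∀ (s : String), Dom_encode_char4 s → Pre_encode_char4 s → Spec_encode_char4 s (encode_char4 s)

-- ===== LEMMAS AND PROOFS =====

-- B's single fold with the 4-tuple accumulator is the 4-tuple of the per-plane folds
theorem rowAccs_split (row : List Char) (a0 a1 a2 a3 : Int) :
    row.foldl (fun a ch =>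
      (PySem.Int.bor (a.1 <<< 1) (PySem.Int.band (pyIntChar ch) 1),
       PySem.Int.bor (a.2.1 <<< 1) (PySem.Int.band (pyIntChar ch) 2 >>> (1 : Nat)),
       PySem.Int.bor (a.2.2.1 <<< 1) (PySem.Int.band (pyIntChar ch) 4 >>> (2 : Nat)),
       PySem.Int.bor (a.2.2.2 <<< 1) (PySem.Int.band (pyIntChar ch) 8 >>> (3 : Nat)))) (a0, a1, a2, a3) =
    (row.foldl (fun b ch => PySem.Int.bor (b <<< 1) (PySem.Int.band (pyIntChar ch) 1)) a0,
     row.foldl (fun b ch => PySem.Int.bor (b <<< 1) (PySem.Int.band (pyIntChar ch) 2 >>> (1 : Nat))) a1,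
     row.foldl (fun b ch => PySem.Int.bor (b <<< 1) (PySem.Int.band (pyIntChar ch) 4 >>> (2 : Nat))) a2,
     row.foldl (fun b ch => PySem.Int.bor (b <<< 1) (PySem.Int.band (pyIntChar ch) 8 >>> (3 : Nat))) a3) := by
  induction row generalizing a0 a1 a2 a3 with
  | nil => rfl
  | cons ch t ih => simp [List.foldl, ih]

-- B's per-row accumulators are exactly A's per-plane folds over the row's pixel values
theorem rowAccs_eq (row : List Char) :
    rowAccs row =
    ((row.map pyIntChar).foldl (fun byte c =>
        PySem.Int.bor (byte <<< 1) (PySem.Int.band c (1 <<< (0 : Int).toNat) >>> (0 : Int).toNat)) 0,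
     (row.map pyIntChar).foldl (fun byte c =>
        PySem.Int.bor (byte <<< 1) (PySem.Int.band c (1 <<< (1 : Int).toNat) >>> (1 : Int).toNat)) 0,
     (row.map pyIntChar).foldl (fun byte c =>
        PySem.Int.bor (byte <<< 1) (PySem.Int.band c (1 <<< (2 : Int).toNat) >>> (2 : Int).toNat)) 0,
     (row.map pyIntChar).foldl (fun byte c =>
        PySem.Int.bor (byte <<< 1) (PySem.Int.band c (1 <<< (3 : Int).toNat) >>> (3 : Int).toNat)) 0) := by
  have h := rowAccs_split row 0 0 0 0
  unfold rowAccs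
  rw [h]
  simp only [List.foldl_map]
  refine congrArg₂ Prod.mk ?_ (congrArg₂ Prod.mk ?_ (congrArg₂ Prod.mk ?_ ?_))
  · apply PySem.List.foldl_congr_mem
    intro acc x _
    simp
  · apply PySem.List.foldl_congr_mem
    intro acc x _
    simp
  · apply PySem.List.foldl_congr_mem
    intro acc x _
    simp
  · apply PySem.List.foldl_congr_mem
    intro acc x _
    simp

-- ===== VERDICT (by name: the statement is the Claim_ definition above) =====
theorem encode_char4_spec : Claim_equal_encode_char4 := by
  intro s _ _
  show encode_char4 s = encode_char4_alt s
  unfold encode_char4 encode_char4_alt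
  have h02 : PySem.List.pyRange 0 (0 + 2) 1 = [0, 1] := by decide
  have h24 : PySem.List.pyRange 2 (2 + 2) 1 = [2, 3] := by decide
  simp only [h02, h24, List.foldl_cons, List.foldl_nil, List.foldl_map, rowAccs_eq,
    List.append_assoc, List.singleton_append]
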